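-- pv_equiv track=rewrite | github.com/sbomify/sbomify | sbomify/apps/core/url_utils.py | is_public_url_path
-- ===== SOURCE A (Python) =====
-- def is_public_url_path(path: str) -> bool:
--     """
--     Check if a URL path is for a public resource.
--
--     Args:
--         path: The URL path
--
--     Returns:
--         Boolean indicating if this is a public URL
--     """
--     public_prefixes = [
--         "/public/workspace/",
--         "/public/product/",
--         "/public/project/",
--         "/public/component/",
--         "/public/document/",
--     ]
--
--     return any(path.startswith(prefix) for prefix in public_prefixes)
-- ===== SOURCE B (Python) =====
-- _PUBLIC_SEGMENTS = {"workspace", "product", "project", "component", "document"}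
--
--
-- def is_public_url_path(path: str) -> bool:
--     """
--     Check if a URL path is for a public resource.
--
--     Single pass: one shared-prefix check, then scan the next path segment up
--     to its terminating slash and look it up in a set.
--     """
--     if not path.startswith("/public/"):
--         return False
--     seg = []
--     for ch in path[len("/public/"):]:
--         if ch == "/":
--             return "".join(seg) in _PUBLIC_SEGMENTS
--         seg.append(ch)
--     return False
-- ===== Notes on version B (the rewrite author's own statement) =====
-- stated objective: alternative
-- what changed: Five full startswith scans over the path are replaced by one shared '/public/' prefix check plus a single scan of the next segment up to its slash and a set lookup.
import Mathlib
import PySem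

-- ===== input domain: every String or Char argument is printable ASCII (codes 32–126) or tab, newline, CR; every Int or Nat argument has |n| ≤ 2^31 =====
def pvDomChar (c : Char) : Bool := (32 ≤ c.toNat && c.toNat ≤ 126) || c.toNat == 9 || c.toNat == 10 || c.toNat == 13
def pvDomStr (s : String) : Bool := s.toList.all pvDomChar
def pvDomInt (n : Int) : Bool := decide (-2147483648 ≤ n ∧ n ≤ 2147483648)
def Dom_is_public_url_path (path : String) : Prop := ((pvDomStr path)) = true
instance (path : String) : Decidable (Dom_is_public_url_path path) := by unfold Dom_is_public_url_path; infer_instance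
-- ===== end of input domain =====

-- B replaces five full startswith scans by one shared '/public/' prefix check plus a
-- single scan of the next segment up to its slash and a set lookup (objective: alternative).

-- ===== PORT A =====
def is_public_url_path (path : String) : Bool :=
  ["/public/workspace/", "/public/product/", "/public/project/", "/public/component/",
   "/public/document/"].any (fun prefix_ => PySem.Str.startswith path prefix_)

-- ===== PORT B =====
-- the set _PUBLIC_SEGMENTS, as the character lists of its members
def pvSegs : List (List Char) :=
  ["workspace".toList, "product".toList, "project".toList, "component".toList, "document".toList]

-- the 'for ch in path[len("/public/"):]' loop of Source B: seg is the accumulator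
def pvAltLoop : List Char → List Char → Bool
  | [], _ => false
  | c :: cs, seg => if c = '/' then pvSegs.contains seg else pvAltLoop cs (seg ++ [c])

def is_public_url_path_alt (path : String) : Bool :=
  if PySem.Str.startswith path "/public/" then
    pvAltLoop (PySem.Str.slice path (some 8) none).toList []
  else false

-- ===== PRECONDITION & SPEC =====
def Spec_is_public_url_path (path : String) (out : Bool) : Prop := out = is_public_url_path_alt path
instance (path : String) (out : Bool) : Decidable (Spec_is_public_url_path path out) := by unfold Spec_is_public_url_path; infer_instance

-- ===== CLAIM (what is proved, stated in full; the proofs are below) =====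
def Claim_equal_is_public_url_path : Prop := ∀ (path : String), Dom_is_public_url_path path → Spec_is_public_url_path path (is_public_url_path path)

-- ===== LEMMAS AND PROOFS =====

-- B's loop finds the first '/'; the characters before it join the accumulator.
theorem pvAltLoop_spec (r : List Char) : ∀ acc : List Char,
    pvAltLoop r acc =
      if '/' ∈ r then pvSegs.contains (acc ++ r.takeWhile (· ≠ '/')) else false := by
  induction r with
  | nil => intro acc; simp [pvAltLoop]
  | cons c cs ih =>
    intro acc
    by_cases hc : c = '/'
    · subst hc; simp [pvAltLoop]
    · simp only [pvAltLoop, if_neg hc, ih]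
      by_cases hm : '/' ∈ cs
      · rw [if_pos hm, if_pos (List.mem_cons_of_mem c hm),
          List.takeWhile_cons_of_pos (by simp [hc])]
        simp
      · rw [if_neg hm, if_neg (by simp [Ne.symm hc, hm])]

-- a word followed by '/' is a prefix of r iff r's first segment is exactly that word
theorem prefix_slash_iff (r : List Char) : ∀ w : List Char, '/' ∉ w →
    ((w ++ ['/']) <+: r ↔ '/' ∈ r ∧ r.takeWhile (· ≠ '/') = w) := by
  induction r with
  | nil => intro w _; simp
  | cons c cs ih =>
    intro w hw
    cases w with
    | nil =>
      by_cases hc : c = '/'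
      · subst hc
        rw [List.takeWhile_cons_of_neg (by simp)]
        simp [List.cons_prefix_cons]
      · rw [List.takeWhile_cons_of_pos (by simp [hc])]
        simp [List.cons_prefix_cons, Ne.symm hc]
    | cons a w' =>
      have ha : a ≠ '/' := by intro h; exact hw (h ▸ List.mem_cons_self)
      have hw' : '/' ∉ w' := fun h => hw (List.mem_cons_of_mem _ h)
      by_cases hc : c = '/'
      · subst hc
        rw [List.takeWhile_cons_of_neg (by simp)]
        constructor
        · intro h
          rw [List.cons_append, List.cons_prefix_cons] at h
          exact absurd h.1 ha
        · rintro ⟨-, h⟩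
          exact absurd h (by simp)
      · rw [List.cons_append, List.cons_prefix_cons, ih w' hw', List.takeWhile_cons_of_pos (by simp [hc])]
        constructor
        · rintro ⟨rfl, hm, htw⟩
          exact ⟨List.mem_cons_of_mem _ hm, by rw [htw]⟩
        · rintro ⟨hm, htw⟩
          injection htw with hca htw'
          have hm' : '/' ∈ cs := by
            rcases List.mem_cons.mp hm with h | h
            · exact absurd h.symm hc
            · exact h
          exact ⟨hca.symm, hm', htw'⟩

theorem is_public_url_path_spec : Claim_equal_is_public_url_path := by
  intro path _
  unfold Spec_is_public_url_path is_public_url_path is_public_url_path_alt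
  by_cases hp : "/public/".toList <+: path.toList
  · -- path starts with "/public/"
    obtain ⟨t, ht⟩ := hp
    have hsw : PySem.Str.startswith path "/public/" = true := by
      simp only [PySem.Str.startswith_eq, PySem.Chars.startswith_iff]
      exact ⟨t, ht⟩
    have hdrop : (PySem.Str.slice path (some 8) none).toList = t := by
      have hd : (PySem.Str.slice path (some 8) none).toList = path.toList.drop 8 := by
        simp [PySem.List.slice_from (a := 8) path.toList (by norm_num)]
      rw [hd, ← ht]; rfl
    rw [hsw, if_pos rfl, hdrop, pvAltLoop_spec t []]
    have hpre : ∀ (s : String) (w : List Char),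
        s.toList = "/public/".toList ++ (w ++ ['/']) → '/' ∉ w →
        (PySem.Str.startswith path s =
          if '/' ∈ t then decide (t.takeWhile (· ≠ '/') = w) else false) := by
      intro s w hs hwslash
      rw [Bool.eq_iff_iff, PySem.Str.startswith_eq, PySem.Chars.startswith_iff, hs,
        ← ht, List.prefix_append_right_inj, prefix_slash_iff t w hwslash]
      split_ifs with h <;> simp [h]
    have h1 := hpre "/public/workspace/" "workspace".toList (by decide) (by decide)
    have h2 := hpre "/public/product/" "product".toList (by decide) (by decide)
    have h3 := hpre "/public/project/" "project".toList (by decide) (by decide)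
    have h4 := hpre "/public/component/" "component".toList (by decide) (by decide)
    have h5 := hpre "/public/document/" "document".toList (by decide) (by decide)
    simp only [List.any_cons, List.any_nil, h1, h2, h3, h4, h5, Bool.or_false]
    by_cases hmem : '/' ∈ t
    · simp only [if_pos hmem, List.nil_append]
      rw [Bool.eq_iff_iff]
      simp only [Bool.or_eq_true, decide_eq_true_eq, pvSegs, List.contains_eq_mem,
        List.mem_cons, List.not_mem_nil, or_false]
    · simp [hmem]
  · -- path does not start with "/public/": every branch of both programs is false
    have hfull : ∀ (s : String) (w : List Char), s.toList = "/public/".toList ++ w →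
        PySem.Str.startswith path s = false := by
      intro s w hs
      rw [← Bool.not_eq_true, PySem.Str.startswith_eq, PySem.Chars.startswith_iff, hs]
      intro h
      exact hp ((List.prefix_append _ _).trans h)
    have hsw := hfull "/public/" [] (by decide)
    have h1 := hfull "/public/workspace/" "workspace/".toList (by decide)
    have h2 := hfull "/public/product/" "product/".toList (by decide)
    have h3 := hfull "/public/project/" "project/".toList (by decide)
    have h4 := hfull "/public/component/" "component/".toList (by decide)
    have h5 := hfull "/public/document/" "document/".toList (by decide)
    simp only [List.any_cons, List.any_nil, h1, h2, h3, h4, h5, hsw, Bool.or_false,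
      Bool.false_eq_true, if_false]
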